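-- pv_equiv track=rewrite | github.com/theorlbooth/Advent_Of_Code | x_day_11.py | return_seats
-- ===== SOURCE A (Python) =====
-- def return_seats(final_array):
--   new_final_array = []
--   for x in final_array:
--     new_x = x[1:]
--     new_new_x = new_x[:-1]
--     new_new_x = new_new_x.replace('2', '#')
--     new_new_x = new_new_x.replace('1', 'L')
--     new_new_x = new_new_x.replace('0', '.')
--     new_final_array.append(new_new_x)
--   return new_final_array
-- ===== SOURCE B (Python) =====
-- _MAP = {'2': '#', '1': 'L', '0': '.'}
--
-- def return_seats(final_array):
--   return [''.join(_MAP.get(c, c) for c in x[1:-1]) for x in final_array]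
-- ===== Notes on version B (the rewrite author's own statement) =====
-- stated objective: idiomatic
-- what changed: Replaces the append-loop with three repeated full-string .replace scans by a list comprehension doing one single character-by-character pass over the inner slice x[1:-1] with a lookup table.
import Mathlib
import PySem

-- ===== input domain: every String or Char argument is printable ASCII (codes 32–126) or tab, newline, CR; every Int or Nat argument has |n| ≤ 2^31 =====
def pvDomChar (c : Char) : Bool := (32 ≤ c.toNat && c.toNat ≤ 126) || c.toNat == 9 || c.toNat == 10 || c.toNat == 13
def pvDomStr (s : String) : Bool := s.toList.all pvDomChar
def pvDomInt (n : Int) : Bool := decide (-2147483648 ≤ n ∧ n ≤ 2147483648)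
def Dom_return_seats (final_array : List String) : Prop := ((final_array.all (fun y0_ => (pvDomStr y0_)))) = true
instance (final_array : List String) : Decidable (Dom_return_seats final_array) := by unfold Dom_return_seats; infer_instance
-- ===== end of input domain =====

-- B does one character-by-character pass over x[1:-1] with a lookup table instead of A's three repeated .replace scans (idiomatic, same cost class).


-- ===== PORT A =====
def return_seats (final_array : List String) : List String :=
  final_array.foldl (fun new_final_array x =>
    let new_x := PySem.Str.slice x (some 1) none
    let new_new_x := PySem.Str.slice new_x none (some (-1))
    let new_new_x2 := PySem.Str.replace new_new_x "2" "#"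
    let new_new_x3 := PySem.Str.replace new_new_x2 "1" "L"
    let new_new_x4 := PySem.Str.replace new_new_x3 "0" "."
    new_final_array ++ [new_new_x4]) []

-- ===== PORT B =====
def pvMapB : PySem.Dict Char Char := PySem.Dict.ofList [('2', '#'), ('1', 'L'), ('0', '.')]

def return_seats_alt (final_array : List String) : List String :=
  final_array.map (fun x =>
    String.ofList ((PySem.Str.slice x (some 1) (some (-1))).toList.map (fun c => pvMapB.getD c c)))

-- ===== PRECONDITION & SPEC =====
def Spec_return_seats (final_array : List String) (out : List String) : Prop := out = return_seats_alt final_array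
instance (final_array : List String) (out : List String) : Decidable (Spec_return_seats final_array out) := by unfold Spec_return_seats; infer_instance

-- ===== CLAIM (what is proved, stated in full; the proofs are below) =====
def Claim_equal_return_seats : Prop := ∀ (final_array : List String), Dom_return_seats final_array → Spec_return_seats final_array (return_seats final_array)

-- ===== LEMMAS AND PROOFS =====

-- single-character str.replace is a per-character map
lemma go_single (o n : Char) : ∀ (s : List Char) (fuel : Nat) (acc : List Char),
    s.length ≤ fuel →
    PySem.Chars.replace.go [o] [n] fuel s acc = acc.reverse ++ s.map (fun c => if c = o then n else c) := by
  intro s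
  induction s with
  | nil => intro fuel acc h; cases fuel <;> simp [PySem.Chars.replace.go]
  | cons c t ih =>
    intro fuel acc h
    cases fuel with
    | zero => simp at h
    | succ f =>
      simp only [PySem.Chars.replace.go]
      by_cases hc : c = o
      · subst hc
        rw [if_pos (by simp [List.isPrefixOf])]
        simp only [List.length_cons, List.length_nil, List.drop_succ_cons, List.drop_zero,
          List.reverse_singleton, List.singleton_append]
        rw [ih f (n :: acc) (by simpa using h)]
        simp
      · have hpre : [o].isPrefixOf (c :: t) = false := by
          simp [List.isPrefixOf, BEq.beq]
          intro h'; exact absurd h'.symm hc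
        rw [if_neg (by simp [hpre])]
        rw [ih f (c :: acc) (by simpa using h)]
        simp [hc]

lemma replace_single (s : List Char) (o n : Char) :
    PySem.Chars.replace s [o] [n] = s.map (fun c => if c = o then n else c) := by
  simp [PySem.Chars.replace, go_single o n s s.length [] le_rfl]

lemma slice_one_neg_one (xs : List Char) :
    PySem.List.slice xs (some 1) (some (-1)) = xs.tail.dropLast := by
  cases xs with
  | nil => rfl
  | cons c t =>
    simp [PySem.List.slice, PySem.List.clampIdx, List.dropLast_eq_take]
    split_ifs <;> omega

lemma pvMapB_getD (c : Char) :
    pvMapB.getD c c = (if c = '0' then '.'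
      else if c = '1' then 'L'
      else if c = '2' then '#' else c) := by
  by_cases h2 : c = '2'
  · subst h2; decide
  · by_cases h1 : c = '1'
    · subst h1; decide
    · by_cases h0 : c = '0'
      · subst h0; decide
      · have b2 : ('2' == c) = false := by rw [beq_eq_false_iff_ne]; exact fun h => h2 h.symm
        have b1 : ('1' == c) = false := by rw [beq_eq_false_iff_ne]; exact fun h => h1 h.symm
        have b0 : ('0' == c) = false := by rw [beq_eq_false_iff_ne]; exact fun h => h0 h.symm
        simp [pvMapB, PySem.Dict.getD, PySem.Dict.ofList, PySem.Dict.get?, PySem.Dict.update,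
          PySem.Dict.empty, PySem.Dict.insert, h2, h1, h0, b2, b1, b0]

lemma perstring (x : String) :
    PySem.Str.replace (PySem.Str.replace (PySem.Str.replace
        (PySem.Str.slice (PySem.Str.slice x (some 1) none) none (some (-1))) "2" "#") "1" "L") "0" "."
      = String.ofList ((PySem.Str.slice x (some 1) (some (-1))).toList.map (fun c => pvMapB.getD c c)) := by
  apply String.toList_inj.mp
  have e2 : ("2" : String).toList = ['2'] := rfl
  have e1 : ("1" : String).toList = ['1'] := rfl
  have e0 : ("0" : String).toList = ['0'] := rfl
  have eh : ("#" : String).toList = ['#'] := rfl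
  have eL : ("L" : String).toList = ['L'] := rfl
  have ed : ("." : String).toList = ['.'] := rfl
  simp only [pysem, e2, e1, e0, eh, eL, ed, PySem.List.slice_from_one, PySem.List.slice_to_neg_one,
    slice_one_neg_one, replace_single, List.map_map, String.toList_ofList]
  apply List.map_congr_left
  intro c _
  rw [pvMapB_getD]
  by_cases h2 : c = '2' <;> by_cases h1 : c = '1' <;> by_cases h0 : c = '0' <;> simp_all

-- ===== VERDICT (by name: the statement is the Claim_ definition above) =====
theorem return_seats_spec : Claim_equal_return_seats := by
  intro fa _
  unfold Spec_return_seats return_seats return_seats_alt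
  rw [show (fun (new_final_array : List String) (x : String) =>
    let new_x := PySem.Str.slice x (some 1) none
    let new_new_x := PySem.Str.slice new_x none (some (-1))
    let new_new_x2 := PySem.Str.replace new_new_x "2" "#"
    let new_new_x3 := PySem.Str.replace new_new_x2 "1" "L"
    let new_new_x4 := PySem.Str.replace new_new_x3 "0" "."
    new_final_array ++ [new_new_x4]) = (fun acc x => acc ++ [PySem.Str.replace (PySem.Str.replace (PySem.Str.replace
        (PySem.Str.slice (PySem.Str.slice x (some 1) none) none (some (-1))) "2" "#") "1" "L") "0" "."]) from rfl]
  rw [PySem.List.foldl_append_singleton_eq_map]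
  apply List.map_congr_left
  intro x _
  exact perstring x
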